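-- pv_equiv track=rewrite | github.com/zl283852861/KouriChat | src/webui/routes/avatar.py | update_section_content
-- ===== SOURCE A (Python) =====
-- def find_section_index(lines, section_title):
--     """查找指定标题在文件行列表中的起始索引"""
--     for i, line in enumerate(lines):
--         if line.startswith(f'# {section_title}'):
--             return i
--     return -1
--
-- def update_section_content(lines, section_title, new_content):
--     """更新指定标题下的内容"""
--     start_index = find_section_index(lines, section_title)
--     if start_index == -1:
--         # 如果标题不存在，添加新的标题和内容
--         lines.extend([f'# {section_title}', new_content])
--     else:
--         # 找到下一个标题的索引
--         end_index = next((i for i in range(start_index + 1, len(lines)) if lines[i].startswith('# ')), len(lines))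
--         # 移除原内容
--         del lines[start_index + 1:end_index]
--         # 插入新内容
--         lines.insert(start_index + 1, new_content)
--     return lines
-- ===== SOURCE B (Python) =====
-- def update_section_content(lines, section_title, new_content):
--     """Single pass: copy until the section header, emit new content, skip the old body, copy the rest."""
--     header = f'# {section_title}'
--     out = []
--     it = iter(lines)
--     for line in it:
--         if line.startswith(header):
--             out.append(line)
--             out.append(new_content)
--             for rest in it:
--                 if rest.startswith('# '):
--                     out.append(rest)
--                     break
--             out.extend(it)
--             break
--         out.append(line)
--     else:
--         out.append(header)
--         out.append(new_content)
--     lines[:] = out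
--     return lines
-- ===== Notes on version B (the rewrite author's own statement) =====
-- stated objective: faster
-- what changed: Replaces A's index-based find/next-header scan plus del-slice and insert on the list with a single forward pass over an iterator that copies lines, emits the new content at the first matching header, skips the old body until the next header, and copies the remainder, avoiding the element-shifting del/insert and the repeated lines[i] indexing; in-place mutation is preserved via lines[:] = out.
import Mathlib
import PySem

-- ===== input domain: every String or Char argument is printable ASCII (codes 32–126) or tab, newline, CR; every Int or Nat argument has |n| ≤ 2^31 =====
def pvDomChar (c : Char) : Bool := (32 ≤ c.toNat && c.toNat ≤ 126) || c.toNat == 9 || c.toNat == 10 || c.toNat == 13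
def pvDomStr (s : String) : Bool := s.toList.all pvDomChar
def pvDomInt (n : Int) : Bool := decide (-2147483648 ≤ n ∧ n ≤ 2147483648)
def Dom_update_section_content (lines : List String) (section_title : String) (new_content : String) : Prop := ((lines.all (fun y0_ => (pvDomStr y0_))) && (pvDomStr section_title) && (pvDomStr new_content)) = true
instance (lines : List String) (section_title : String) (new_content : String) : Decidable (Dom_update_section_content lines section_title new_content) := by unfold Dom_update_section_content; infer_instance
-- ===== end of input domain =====

-- B replaces A's find-index / next-header-index / del-slice / insert with a single
-- forward copy-skip-copy pass (equal RETURN value; both Pythons also mutate `lines` in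
-- place to that same value, B via `lines[:] = out`).

-- ===== PORT A =====

-- for i, line in enumerate(lines): if line.startswith(f'# {t}'): return i / return -1
def fsiAux (t : String) : List String → Int → Int
  | [], _ => -1
  | l :: ls, i => if PySem.Str.startswith l ("# " ++ t) then i else fsiAux t ls (i + 1)

def find_section_index (lines : List String) (section_title : String) : Int :=
  fsiAux section_title lines 0

-- next((i for i in range(start+1, len(lines)) if lines[i].startswith('# ')), len(lines))
-- (indices supplied by the range are always in bounds, so `(pyGet? …).getD ""` is exact)
def nextHeaderIdx (lines : List String) : List Int → Int
  | [] => (lines.length : Int)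
  | i :: is =>
      if PySem.Str.startswith ((PySem.List.pyGet? lines i).getD "") "# " then i
      else nextHeaderIdx lines is

-- 'del lines[start+1:end_index]; lines.insert(start+1, new_content)': since
-- 0 ≤ start+1 ≤ end_index ≤ len(lines), this is exactly take/[new]/drop.
def update_section_content (lines : List String) (section_title : String) (new_content : String) : List String :=
  if find_section_index lines section_title = -1 then
    lines ++ ["# " ++ section_title, new_content]
  else
    lines.take (find_section_index lines section_title + 1).toNat ++ [new_content] ++
      lines.drop (nextHeaderIdx lines
        (PySem.List.pyRange (find_section_index lines section_title + 1) (lines.length : Int) 1)).toNat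

-- ===== PORT B =====

-- inner loop: discard until the next '# ' header, then the rest is copied unchanged
def uscSkip : List String → List String
  | [] => []
  | l :: ls => if PySem.Str.startswith l "# " then l :: ls else uscSkip ls

-- outer loop: copy lines until the first matching header; for-else appends the new section
def uscCopy (hdr c : String) : List String → List String
  | [] => [hdr, c]
  | l :: ls => if PySem.Str.startswith l hdr then l :: c :: uscSkip ls else l :: uscCopy hdr c ls

def update_section_content_alt (lines : List String) (section_title : String) (new_content : String) : List String :=
  uscCopy ("# " ++ section_title) new_content lines

-- ===== PRECONDITION & SPEC =====
def Spec_update_section_content (lines : List String) (section_title : String) (new_content : String) (out : List String) : Prop := out = update_section_content_alt lines section_title new_content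
instance (lines : List String) (section_title : String) (new_content : String) (out : List String) : Decidable (Spec_update_section_content lines section_title new_content out) := by unfold Spec_update_section_content; infer_instance

-- ===== CLAIM (what is proved, stated in full; the proofs are below) =====
def Claim_equal_update_section_content : Prop := ∀ (lines : List String) (section_title : String) (new_content : String), Dom_update_section_content lines section_title new_content → Spec_update_section_content lines section_title new_content (update_section_content lines section_title new_content)

-- ===== LEMMAS AND PROOFS =====

-- fsiAux returns -1 or an index at least its start offset
lemma fsiAux_cases (t : String) (xs : List String) : ∀ (i : Int),
    fsiAux t xs i = -1 ∨ i ≤ fsiAux t xs i := by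
  induction xs with
  | nil => intro i; left; rfl
  | cons l ls ih =>
      intro i
      simp only [fsiAux]
      by_cases h : PySem.Str.startswith l ("# " ++ t) = true
      · rw [if_pos h]; right; rfl
      · rw [if_neg h]
        rcases ih (i + 1) with h1 | h1 <;> omega

-- fsiAux shifts its start offset additively
lemma fsiAux_shift (t : String) (xs : List String) (i : Int) :
    fsiAux t xs i = if fsiAux t xs 0 = -1 then -1 else fsiAux t xs 0 + i := by
  induction xs generalizing i with
  | nil => simp [fsiAux]
  | cons l ls ih =>
      simp only [fsiAux]
      by_cases h : PySem.Str.startswith l ("# " ++ t) = true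
      · rw [if_pos h, if_pos h]; norm_num
      · rw [if_neg h, if_neg h, ih (i + 1), ih (0 + 1)]
        have hf := fsiAux_cases t ls 0
        split_ifs with h1 <;> omega

lemma nextHeaderIdx_shift (l : String) (ls : List String) :
    ∀ (fuel j n : Nat), n - j ≤ fuel →
    nextHeaderIdx (l :: ls) (PySem.List.pyRange ((j : Int) + 1) ((n : Int) + 1) 1)
      = nextHeaderIdx ls (PySem.List.pyRange (j : Int) (n : Int) 1) + 1 := by
  intro fuel
  induction fuel with
  | zero =>
      intro j n h
      rw [PySem.List.pyRange_one_eq_nil (by omega), PySem.List.pyRange_one_eq_nil (by omega : (n : Int) ≤ (j : Int))]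
      simp [nextHeaderIdx]
  | succ f ih =>
      intro j n h
      by_cases hlt : j < n
      · rw [PySem.List.pyRange_one_cons (by omega : (j : Int) + 1 < (n : Int) + 1),
            PySem.List.pyRange_one_cons (by omega : (j : Int) < (n : Int))]
        simp only [nextHeaderIdx, PySem.List.pyGet?_cons_succ l ls j]
        split_ifs with hs
        · rfl
        · rw [(by push_cast; ring : ((j : Int) + 1) + 1 = ((j + 1 : Nat) : Int) + 1),
              (by push_cast; ring : (j : Int) + 1 = ((j + 1 : Nat) : Int))]
          exact ih (j + 1) n (by omega)
      · rw [PySem.List.pyRange_one_eq_nil (by omega), PySem.List.pyRange_one_eq_nil (by omega : (n : Int) ≤ (j : Int))]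
        simp [nextHeaderIdx]

lemma nextHeaderIdx_bounds (ls : List String) :
    ∀ (fuel j : Nat), ls.length - j ≤ fuel →
    0 ≤ nextHeaderIdx ls (PySem.List.pyRange (j : Int) (ls.length : Int) 1) ∧
    nextHeaderIdx ls (PySem.List.pyRange (j : Int) (ls.length : Int) 1) ≤ (ls.length : Int) := by
  intro fuel
  induction fuel with
  | zero =>
      intro j h
      rw [PySem.List.pyRange_one_eq_nil (by omega : (ls.length : Int) ≤ (j : Int))]
      simp only [nextHeaderIdx]
      omega
  | succ f ih =>
      intro j h
      by_cases hlt : j < ls.length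
      · rw [PySem.List.pyRange_one_cons (by omega : (j : Int) < (ls.length : Int))]
        simp only [nextHeaderIdx]
        split_ifs with hs
        · omega
        · have h2 := ih (j + 1) (by omega)
          rw [(by push_cast; ring : (j : Int) + 1 = ((j + 1 : Nat) : Int))]
          omega
      · rw [PySem.List.pyRange_one_eq_nil (by omega : (ls.length : Int) ≤ (j : Int))]
        simp only [nextHeaderIdx]
        omega

-- dropping at the next-header index is exactly the skip loop of B
lemma drop_nextHeaderIdx_gen :
    ∀ (fuel : Nat) (zs pre : List String), zs.length ≤ fuel →
    (pre ++ zs).drop (nextHeaderIdx (pre ++ zs)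
      (PySem.List.pyRange ((pre.length : Nat) : Int) (((pre ++ zs).length : Nat) : Int) 1)).toNat
      = uscSkip zs := by
  intro fuel
  induction fuel with
  | zero =>
      intro zs pre hz
      have hz0 : zs = [] := by cases zs with | nil => rfl | cons a as => simp at hz
      subst hz0
      rw [PySem.List.pyRange_one_eq_nil (by simp)]
      simp [nextHeaderIdx, uscSkip]
  | succ f ih =>
      intro zs pre hz
      cases zs with
      | nil =>
          rw [PySem.List.pyRange_one_eq_nil (by simp)]
          simp [nextHeaderIdx, uscSkip]
      | cons z zs' =>
          have hlen : ((pre.length : Nat) : Int) < (((pre ++ z :: zs').length : Nat) : Int) := by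
            simp
          rw [PySem.List.pyRange_one_cons hlen]
          simp only [nextHeaderIdx, PySem.List.pyGet?_append_length pre zs' z, Option.getD_some]
          by_cases hs : PySem.Str.startswith z "# "
          · rw [if_pos hs, uscSkip, if_pos hs]
            simp
          · rw [if_neg hs, uscSkip, if_neg hs]
            have hre : pre ++ z :: zs' = (pre ++ [z]) ++ zs' := by simp
            have hc1 : ((pre.length : Nat) : Int) + 1 = (((pre ++ [z]).length : Nat) : Int) := by
              simp
            rw [hre] at hlen ⊢
            rw [hc1]
            exact ih zs' (pre ++ [z]) (by simp at hz ⊢; omega)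

lemma drop_nextHeaderIdx (ls : List String) :
    ls.drop (nextHeaderIdx ls (PySem.List.pyRange 0 (ls.length : Int) 1)).toNat = uscSkip ls := by
  simpa using drop_nextHeaderIdx_gen ls.length ls [] le_rfl

-- A commutes with a non-matching head line
lemma A_cons (l : String) (ls : List String) (t c : String)
    (h : ¬ PySem.Str.startswith l ("# " ++ t) = true) :
    update_section_content (l :: ls) t c = l :: update_section_content ls t c := by
  have hstep : find_section_index (l :: ls) t
      = if fsiAux t ls 0 = -1 then -1 else fsiAux t ls 0 + 1 := by
    unfold find_section_index
    rw [fsiAux, if_neg h, fsiAux_shift]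
    norm_num
  rcases fsiAux_cases t ls 0 with h0 | h0
  · have h1 : find_section_index (l :: ls) t = -1 := by rw [hstep, if_pos h0]
    unfold update_section_content
    rw [h1, if_pos rfl]
    unfold find_section_index
    rw [h0, if_pos rfl]
    simp
  · have hne : ¬ fsiAux t ls 0 = -1 := by omega
    have h1 : find_section_index (l :: ls) t = fsiAux t ls 0 + 1 := by rw [hstep, if_neg hne]
    unfold update_section_content
    rw [h1]
    unfold find_section_index
    rw [if_neg (by omega), if_neg hne]
    have e1 : nextHeaderIdx (l :: ls)
        (PySem.List.pyRange (fsiAux t ls 0 + 1 + 1) ((l :: ls).length : Int) 1)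
        = nextHeaderIdx ls (PySem.List.pyRange (fsiAux t ls 0 + 1) (ls.length : Int) 1) + 1 := by
      rw [(by omega : fsiAux t ls 0 + 1 + 1 = (((fsiAux t ls 0).toNat + 1 : Nat) : Int) + 1),
          (by simp : ((l :: ls).length : Int) = ((ls.length : Nat) : Int) + 1),
          nextHeaderIdx_shift l ls ls.length ((fsiAux t ls 0).toNat + 1) ls.length (by omega),
          (by omega : (((fsiAux t ls 0).toNat + 1 : Nat) : Int) = fsiAux t ls 0 + 1)]
    rw [e1]
    have hb : 0 ≤ nextHeaderIdx ls (PySem.List.pyRange (fsiAux t ls 0 + 1) (ls.length : Int) 1) ∧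
        nextHeaderIdx ls (PySem.List.pyRange (fsiAux t ls 0 + 1) (ls.length : Int) 1) ≤ (ls.length : Int) := by
      rw [(by omega : fsiAux t ls 0 + 1 = (((fsiAux t ls 0).toNat + 1 : Nat) : Int))]
      exact nextHeaderIdx_bounds ls ls.length ((fsiAux t ls 0).toNat + 1) (by omega)
    rw [(by omega : (fsiAux t ls 0 + 1 + 1).toNat = (fsiAux t ls 0 + 1).toNat + 1),
        (by omega : (nextHeaderIdx ls (PySem.List.pyRange (fsiAux t ls 0 + 1) (ls.length : Int) 1) + 1).toNat
          = (nextHeaderIdx ls (PySem.List.pyRange (fsiAux t ls 0 + 1) (ls.length : Int) 1)).toNat + 1)]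
    simp [List.take_succ_cons, List.drop_succ_cons]

-- the matching-head case: A produces head, content, then B's skip of the tail
lemma A_head_match (l : String) (ls : List String) (t c : String)
    (h : PySem.Str.startswith l ("# " ++ t) = true) :
    update_section_content (l :: ls) t c = l :: c :: uscSkip ls := by
  have h1 : find_section_index (l :: ls) t = 0 := by
    unfold find_section_index; rw [fsiAux, if_pos h]
  unfold update_section_content
  rw [h1, if_neg (by omega)]
  have e1 : nextHeaderIdx (l :: ls) (PySem.List.pyRange (0 + 1) ((l :: ls).length : Int) 1)
      = nextHeaderIdx ls (PySem.List.pyRange 0 (ls.length : Int) 1) + 1 := by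
    rw [(by norm_num : (0 : Int) + 1 = ((0 : Nat) : Int) + 1),
        (by simp : ((l :: ls).length : Int) = ((ls.length : Nat) : Int) + 1),
        nextHeaderIdx_shift l ls ls.length 0 ls.length (by omega)]
    norm_num
  rw [e1]
  have hb := nextHeaderIdx_bounds ls ls.length 0 (by omega)
  rw [(by norm_num : ((0 : Nat) : Int) = (0 : Int))] at hb
  rw [(by omega : (nextHeaderIdx ls (PySem.List.pyRange 0 (ls.length : Int) 1) + 1).toNat
        = (nextHeaderIdx ls (PySem.List.pyRange 0 (ls.length : Int) 1)).toNat + 1)]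
  rw [(by norm_num : ((0 : Int) + 1).toNat = 1)]
  simp only [List.take_succ_cons, List.take_zero, List.drop_succ_cons]
  rw [drop_nextHeaderIdx ls]
  simp

lemma main_eq (lines : List String) (t c : String) :
    update_section_content lines t c = update_section_content_alt lines t c := by
  unfold update_section_content_alt
  induction lines with
  | nil =>
      unfold update_section_content find_section_index
      simp [fsiAux, uscCopy]
  | cons l ls ih =>
      by_cases h : PySem.Str.startswith l ("# " ++ t) = true
      · rw [A_head_match l ls t c h, uscCopy, if_pos h]
      · rw [A_cons l ls t c h, uscCopy, if_neg h, ih]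

-- ===== VERDICT (by name: the statement is the Claim_ definition above) =====
theorem update_section_content_spec : Claim_equal_update_section_content := by
  intro lines t c _
  unfold Spec_update_section_content
  exact main_eq lines t c
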